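-- pv_equiv track=rewrite | github.com/yongchao98/NL2TL | auto_detect_span.py | get_new_ltl
-- ===== SOURCE A (Python) =====
-- def get_new_ltl(auto, ltl, prop_id):
--     ltl = ltl.split(' ')
--     start_idxs = []
--     end_idxs = []
--     for i, op in enumerate(ltl):
--         if op == auto[0]:
--             start_idxs.append(i)
--         if op == auto[-1]:
--             end_idxs.append(i+1)
--     dist = 100000000
--     s_idx = 0
--     e_idx = len(ltl)
--     for s in start_idxs:
--         for e in end_idxs:
--             if e - s < dist and e - s > 0:
--                 s_idx = s
--                 e_idx = e
--                 dist = e - s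
--     sub_ltl = ' '.join(ltl[s_idx:e_idx])
--     ltl = ' '.join(ltl)
--     num_left = sub_ltl.count('(')
--     num_right = sub_ltl.count(')')
--     assert num_left >= num_right and num_left - num_right <= 1
--     if num_left > num_right:
--          sub_ltl += ' )'
--     ltl = ltl.replace(sub_ltl, prop_id)
--     while '  ' in ltl:
--         ltl = ltl.replace('  ', ' ')
--     return ltl, sub_ltl
-- ===== SOURCE B (Python) =====
-- def get_new_ltl(auto, ltl, prop_id):
--     toks = ltl.split(' ')
--     first = auto[0]
--     last = auto[-1]
--     dist = 100000000
--     s_idx = 0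
--     e_idx = len(toks)
--     s_last = -1
--     for i, op in enumerate(toks):
--         if op == first:
--             s_last = i
--         if op == last and s_last >= 0 and i + 1 - s_last < dist:
--             dist = i + 1 - s_last
--             s_idx = s_last
--             e_idx = i + 1
--     sub_ltl = ' '.join(toks[s_idx:e_idx])
--     num_left = sub_ltl.count('(')
--     num_right = sub_ltl.count(')')
--     assert num_left >= num_right and num_left - num_right <= 1
--     if num_left > num_right:
--         sub_ltl += ' )'
--     new = ' '.join(toks).replace(sub_ltl, prop_id)
--     out = []
--     for c in new:
--         if c == ' ' and out and out[-1] == ' ':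
--             continue
--         out.append(c)
--     return ''.join(out), sub_ltl
-- ===== Notes on version B (the rewrite author's own statement) =====
-- stated objective: alternative
-- what changed: B finds the minimal positive (start,end) token span in one pass that tracks only the most recent start index instead of A's nested loop over all start*end index pairs, and collapses repeated spaces in one character pass instead of A's repeated whole-string replace(' ',' ') loop.
import Mathlib
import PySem

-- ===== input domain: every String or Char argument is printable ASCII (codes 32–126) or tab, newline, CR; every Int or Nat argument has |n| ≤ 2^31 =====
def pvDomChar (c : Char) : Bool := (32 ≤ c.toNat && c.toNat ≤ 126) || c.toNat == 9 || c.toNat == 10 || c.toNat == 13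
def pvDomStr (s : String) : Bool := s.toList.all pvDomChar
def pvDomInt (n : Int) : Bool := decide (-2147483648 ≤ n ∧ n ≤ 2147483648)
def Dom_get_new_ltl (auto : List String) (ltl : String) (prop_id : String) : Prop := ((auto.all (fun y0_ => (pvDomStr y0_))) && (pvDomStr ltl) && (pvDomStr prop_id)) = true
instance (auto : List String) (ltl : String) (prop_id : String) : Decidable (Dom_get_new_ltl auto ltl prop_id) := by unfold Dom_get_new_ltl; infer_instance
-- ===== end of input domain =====

-- B replaces A's nested scan over all (start,end) index pairs by a single pass that keeps only
-- the most recent start index, and A's repeated '  '->' ' replace loop by a one-pass character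
-- filter (objective: alternative). Equivalence is claimed on Pre_ (auto nonempty, A's assert passes).

-- ===== PORT A =====
-- while '  ' in ltl: ltl = ltl.replace('  ', ' ')  — fuel-guarded while loop; the port calls it
-- with fuel > len(ltl), which the proof shows is enough for the loop to reach its fixpoint
def pvCollapse : Nat → String → String
  | 0, s => s
  | fuel + 1, s =>
    if PySem.Str.isIn "  " s then pvCollapse fuel (PySem.Str.replace s "  " " ") else s

def get_new_ltl (auto : List String) (ltl : String) (prop_id : String) : String × String :=
  match PySem.List.pyGet? auto 0, PySem.List.pyGet? auto (-1) with
  | some a0, some aN =>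
    let toks := (PySem.Str.split? ltl " ").getD []
    let se := (PySem.List.enumerate toks 0).foldl
        (fun (p : List Int × List Int) q =>
          let p1 := if q.2 == a0 then (p.1 ++ [q.1], p.2) else p
          if q.2 == aN then (p1.1, p1.2 ++ [q.1 + 1]) else p1)
        ([], [])
    let st := se.1.foldl (fun st s =>
        se.2.foldl (fun (st : Int × Int × Int) e =>
          if e - s < st.1 ∧ e - s > 0 then (e - s, s, e) else st) st)
      ((100000000 : Int), 0, PySem.List.len toks)
    let sub := PySem.Str.join " " (PySem.List.slice toks (some st.2.1) (some st.2.2))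
    let ltl2 := PySem.Str.join " " toks
    let nl := PySem.Str.count sub "("
    let nr := PySem.Str.count sub ")"
    if nl ≥ nr ∧ (nl : Int) - (nr : Int) ≤ 1 then
      let sub2 := if nl > nr then sub ++ " )" else sub
      let r := PySem.Str.replace ltl2 sub2 prop_id
      (pvCollapse ((PySem.Str.len r).toNat + 1) r, sub2)
    else ("", "")
  | _, _ => ("", "")

-- ===== PORT B =====
def pvDedup (cs : List Char) : List Char :=
  cs.foldl (fun acc c => if c == ' ' && acc.getLast? == some ' ' then acc else acc ++ [c]) []

def get_new_ltl_alt (auto : List String) (ltl : String) (prop_id : String) : String × String :=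
  match PySem.List.pyGet? auto 0 with
  | none => ("", "")
  | some first =>
  match PySem.List.pyGet? auto (-1) with
  | none => ("", "")
  | some lastt =>
    let toks := (PySem.Str.split? ltl " ").getD []
    let st := (PySem.List.enumerate toks 0).foldl
        (fun (st : Int × Int × Int × Int) q =>
          let sl := if q.2 == first then q.1 else st.1
          if q.2 == lastt ∧ sl ≥ 0 ∧ q.1 + 1 - sl < st.2.1 then
            (sl, q.1 + 1 - sl, sl, q.1 + 1)
          else (sl, st.2))
        ((-1 : Int), (100000000 : Int), 0, PySem.List.len toks)
    let sub := PySem.Str.join " " (PySem.List.slice toks (some st.2.2.1) (some st.2.2.2))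
    let nl := PySem.Str.count sub "("
    let nr := PySem.Str.count sub ")"
    if nl ≥ nr ∧ (nl : Int) - (nr : Int) ≤ 1 then
      let sub2 := if nl > nr then sub ++ " )" else sub
      let r := PySem.Str.replace (PySem.Str.join " " toks) sub2 prop_id
      (String.ofList (pvDedup r.toList), sub2)
    else ("", "")

-- ===== PRECONDITION & SPEC =====
-- Helpers describing the span A's assert inspects: among all (start,end) token-index pairs the
-- first one attaining the minimal positive gap (below A's 10^8 threshold), else [0:len(toks)].
def pvS (a0 : String) (l : List (Int × String)) : List Int :=
  (l.filter (fun q => q.2 == a0)).map (·.1)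
def pvE (aN : String) (l : List (Int × String)) : List Int :=
  (l.filter (fun q => q.2 == aN)).map (fun q => q.1 + 1)
def pvPairs (S E : List Int) : List (Int × Int) :=
  S.flatMap (fun s => E.map (fun e => (s, e)))

def pvDmin (ps : List (Int × Int)) (d0 : Int) : Int :=
  ps.foldl (fun d p => if p.2 - p.1 < d ∧ p.2 - p.1 > 0 then p.2 - p.1 else d) d0

def pvSpan (toks : List String) (a0 aN : String) : Int × Int :=
  if pvDmin (pvPairs (pvS a0 (PySem.List.enumerate toks 0)) (pvE aN (PySem.List.enumerate toks 0))) 100000000 < 100000000 then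
    match (pvPairs (pvS a0 (PySem.List.enumerate toks 0)) (pvE aN (PySem.List.enumerate toks 0))).find?
      (fun p => p.2 - p.1 == pvDmin (pvPairs (pvS a0 (PySem.List.enumerate toks 0)) (pvE aN (PySem.List.enumerate toks 0))) 100000000) with
    | some p => p
    | none => (0, PySem.List.len toks)
  else (0, PySem.List.len toks)

def pvSub (auto : List String) (ltl : String) : String :=
  ((PySem.List.pyGet? auto 0).bind (fun a0 =>
    (PySem.List.pyGet? auto (-1)).map (fun aN =>
      let toks := (PySem.Str.split? ltl " ").getD []
      let sp := pvSpan toks a0 aN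
      PySem.Str.join " " (PySem.List.slice toks (some sp.1) (some sp.2))))).getD ""

-- Pre_ excludes exactly the inputs where A raises: auto = [] (IndexError on auto[0]) and the
-- inputs where A's assert on the selected sub-formula's parenthesis counts fails
-- (AssertionError); B raises the same two exceptions on the same inputs.
def Pre_get_new_ltl (auto : List String) (ltl : String) (prop_id : String) : Prop :=
  auto ≠ [] ∧
  PySem.Str.count (pvSub auto ltl) "(" ≥ PySem.Str.count (pvSub auto ltl) ")" ∧
  (PySem.Str.count (pvSub auto ltl) "(" : Int) - (PySem.Str.count (pvSub auto ltl) ")" : Int) ≤ 1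
instance (auto : List String) (ltl : String) (prop_id : String) : Decidable (Pre_get_new_ltl auto ltl prop_id) := by unfold Pre_get_new_ltl; infer_instance

def pvWitness_get_new_ltl : List String × String × String := (["G", "F"], "G ( a U b ) F c", "prop_1")

def Spec_get_new_ltl (auto : List String) (ltl : String) (prop_id : String) (out : String × String) : Prop := out = get_new_ltl_alt auto ltl prop_id
instance (auto : List String) (ltl : String) (prop_id : String) (out : String × String) : Decidable (Spec_get_new_ltl auto ltl prop_id out) := by unfold Spec_get_new_ltl; infer_instance

-- ===== CLAIM (what is proved, stated in full; the proofs are below) =====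
def Claim_equal_get_new_ltl : Prop := ∀ (auto : List String) (ltl : String) (prop_id : String), Dom_get_new_ltl auto ltl prop_id → Pre_get_new_ltl auto ltl prop_id → Spec_get_new_ltl auto ltl prop_id (get_new_ltl auto ltl prop_id)

-- ===== LEMMAS AND PROOFS =====
def pvUpd (st : Int × Int × Int) (p : Int × Int) : Int × Int × Int :=
  if p.2 - p.1 < st.1 ∧ p.2 - p.1 > 0 then (p.2 - p.1, p.1, p.2) else st

theorem pvDmin_nil (d0 : Int) : pvDmin [] d0 = d0 := rfl

theorem pvDmin_cons (q : Int × Int) (t : List (Int × Int)) (d0 : Int) :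
    pvDmin (q :: t) d0 = pvDmin t (if q.2 - q.1 < d0 ∧ q.2 - q.1 > 0 then q.2 - q.1 else d0) := rfl

theorem pvDmin_le (ps : List (Int × Int)) (d0 : Int) : pvDmin ps d0 ≤ d0 := by
  induction ps generalizing d0 with
  | nil => simp [pvDmin]
  | cons q t ih =>
    rw [pvDmin_cons]
    split_ifs with h
    · exact le_trans (ih _) (le_of_lt h.1)
    · exact ih _

theorem pvDmin_le_mem (ps : List (Int × Int)) (d0 : Int) (p : Int × Int) (hp : p ∈ ps)
    (hpos : 0 < p.2 - p.1) : pvDmin ps d0 ≤ p.2 - p.1 := by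
  induction ps generalizing d0 with
  | nil => simp at hp
  | cons q t ih =>
    rw [pvDmin_cons]
    rcases List.mem_cons.1 hp with rfl | hp'
    · split_ifs with h
      · exact pvDmin_le t _
      · rcases not_and_or.1 h with h' | h'
        · exact le_trans (pvDmin_le t _) (by omega)
        · omega
    · split_ifs with h
      · exact ih _ hp'
      · exact ih _ hp'

theorem pvDmin_mem (ps : List (Int × Int)) (d0 : Int) :
    pvDmin ps d0 = d0 ∨ ∃ p ∈ ps, 0 < p.2 - p.1 ∧ p.2 - p.1 < d0 ∧ pvDmin ps d0 = p.2 - p.1 := by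
  induction ps generalizing d0 with
  | nil => left; rfl
  | cons q t ih =>
    rw [pvDmin_cons]
    split_ifs with h
    · rcases ih (q.2 - q.1) with h1 | ⟨p, hp, h2, h3, h4⟩
      · right; exact ⟨q, List.mem_cons_self .., h.2, h.1, h1⟩
      · right; exact ⟨p, List.mem_cons_of_mem _ hp, h2, lt_trans h3 h.1, h4⟩
    · rcases ih d0 with h1 | ⟨p, hp, h2, h3, h4⟩
      · left; exact h1
      · right; exact ⟨p, List.mem_cons_of_mem _ hp, h2, h3, h4⟩

theorem foldl_pvUpd_stable (ps : List (Int × Int)) (st : Int × Int × Int)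
    (h : pvDmin ps st.1 = st.1) : ps.foldl pvUpd st = st := by
  induction ps generalizing st with
  | nil => rfl
  | cons q t ih =>
    rw [pvDmin_cons] at h
    rw [List.foldl_cons]
    by_cases hc : q.2 - q.1 < st.1 ∧ q.2 - q.1 > 0
    · exfalso
      rw [if_pos hc] at h
      have := pvDmin_le t (q.2 - q.1)
      omega
    · rw [if_neg hc] at h
      have : pvUpd st q = st := by unfold pvUpd; rw [if_neg hc]
      rw [this]
      exact ih _ h

theorem foldl_pvUpd_find (ps : List (Int × Int)) (st : Int × Int × Int)
    (h : pvDmin ps st.1 < st.1) :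
    ∃ p, ps.find? (fun q => q.2 - q.1 == pvDmin ps st.1) = some p ∧
      ps.foldl pvUpd st = (pvDmin ps st.1, p.1, p.2) := by
  induction ps generalizing st with
  | nil => rw [pvDmin_nil] at h; omega
  | cons q t ih =>
    have hpos : 0 < pvDmin (q :: t) st.1 := by
      rcases pvDmin_mem (q :: t) st.1 with h1 | ⟨p, _, h2, _, h4⟩
      · omega
      · omega
    rw [List.foldl_cons]
    by_cases hc : q.2 - q.1 < st.1 ∧ q.2 - q.1 > 0
    · have hupd : pvUpd st q = (q.2 - q.1, q.1, q.2) := by unfold pvUpd; rw [if_pos hc]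
      have hdc : pvDmin (q :: t) st.1 = pvDmin t (q.2 - q.1) := by
        rw [pvDmin_cons, if_pos hc]
      rw [hdc] at h hpos ⊢
      rw [hupd]
      by_cases h2 : pvDmin t (q.2 - q.1) < q.2 - q.1
      · obtain ⟨p, hf, he⟩ := ih (q.2 - q.1, q.1, q.2) h2
        refine ⟨p, ?_, he⟩
        rw [List.find?_cons_of_neg, hf]
        simp only [beq_iff_eq]
        omega
      · have heq : pvDmin t (q.2 - q.1) = q.2 - q.1 :=
          le_antisymm (pvDmin_le t _) (not_lt.1 h2)
        refine ⟨q, ?_, ?_⟩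
        · rw [List.find?_cons_of_pos]
          simp only [beq_iff_eq]
          omega
        · rw [foldl_pvUpd_stable t (q.2 - q.1, q.1, q.2) heq, heq]
    · have hupd : pvUpd st q = st := by unfold pvUpd; rw [if_neg hc]
      have hdc : pvDmin (q :: t) st.1 = pvDmin t st.1 := by
        rw [pvDmin_cons, if_neg hc]
      rw [hdc] at h hpos ⊢
      rw [hupd]
      obtain ⟨p, hf, he⟩ := ih st h
      refine ⟨p, ?_, he⟩
      rw [List.find?_cons_of_neg, hf]
      simp only [beq_iff_eq]
      rcases not_and_or.1 hc with h' | h' <;> omega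

-- A's nested pair loop is the pvUpd-fold over the lexicographic pair list
theorem nested_foldl_eq (S E : List Int) (st : Int × Int × Int) :
    S.foldl (fun st s =>
        E.foldl (fun (st : Int × Int × Int) e =>
          if e - s < st.1 ∧ e - s > 0 then (e - s, s, e) else st) st) st
      = (pvPairs S E).foldl pvUpd st := by
  induction S generalizing st with
  | nil => rfl
  | cons s S ih =>
    rw [List.foldl_cons]
    rw [show pvPairs (s :: S) E = E.map (fun e => (s, e)) ++ pvPairs S E from rfl,
      List.foldl_append, ← ih]
    congr 1
    rw [List.foldl_map]
    rfl

-- A's first loop builds exactly (pvS, pvE)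
theorem enum_foldl_eq (a0 aN : String) (l : List (Int × String)) (xs ys : List Int) :
    l.foldl
      (fun (p : List Int × List Int) q =>
        let p1 := if q.2 == a0 then (p.1 ++ [q.1], p.2) else p
        if q.2 == aN then (p1.1, p1.2 ++ [q.1 + 1]) else p1)
      (xs, ys)
      = (xs ++ pvS a0 l, ys ++ pvE aN l) := by
  induction l generalizing xs ys with
  | nil => simp [pvS, pvE]
  | cons q t ih =>
    rw [List.foldl_cons]
    by_cases h0 : q.2 == a0 <;> by_cases hN : q.2 == aN <;>
      simp only [h0, hN, if_pos, if_neg, ih, pvS, pvE, List.filter_cons] <;>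
      simp [h0, hN, List.append_assoc]

theorem mem_pvPairs (S E : List Int) (p : Int × Int) :
    p ∈ pvPairs S E ↔ p.1 ∈ S ∧ p.2 ∈ E := by
  unfold pvPairs
  simp only [List.mem_flatMap, List.mem_map]
  constructor
  · rintro ⟨s, hs, e, he, rfl⟩; exact ⟨hs, he⟩
  · rintro ⟨h1, h2⟩; exact ⟨p.1, h1, p.2, h2, rfl⟩

theorem mem_pvS (a0 : String) (l : List (Int × String)) (s : Int) :
    s ∈ pvS a0 l ↔ ∃ q ∈ l, q.2 = a0 ∧ s = q.1 := by
  unfold pvS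
  simp only [List.mem_map, List.mem_filter, beq_iff_eq]
  constructor
  · rintro ⟨q, ⟨hq, hq2⟩, rfl⟩; exact ⟨q, hq, hq2, rfl⟩
  · rintro ⟨q, hq, hq2, rfl⟩; exact ⟨q, ⟨hq, hq2⟩, rfl⟩

theorem mem_pvE (aN : String) (l : List (Int × String)) (e : Int) :
    e ∈ pvE aN l ↔ ∃ q ∈ l, q.2 = aN ∧ e = q.1 + 1 := by
  unfold pvE
  simp only [List.mem_map, List.mem_filter, beq_iff_eq]
  constructor
  · rintro ⟨q, ⟨hq, hq2⟩, rfl⟩; exact ⟨q, hq, hq2, rfl⟩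
  · rintro ⟨q, hq, hq2, rfl⟩; exact ⟨q, ⟨hq, hq2⟩, rfl⟩

-- find? on an R-sorted list returns an R-minimal match
theorem find?_min_of_pairwise {α : Type} {R : α → α → Prop} {l : List α} {P : α → Bool} {p : α}
    (hpw : l.Pairwise R) (hf : l.find? P = some p) :
    ∀ q ∈ l, P q = true → p = q ∨ R p q := by
  induction l with
  | nil => simp at hf
  | cons a t ih =>
    rcases List.pairwise_cons.1 hpw with ⟨ha, ht⟩
    by_cases hP : P a
    · rw [List.find?_cons_of_pos hP] at hf
      obtain rfl : a = p := by injection hf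
      intro q hq _
      rcases List.mem_cons.1 hq with rfl | hq'
      · exact Or.inl rfl
      · exact Or.inr (ha q hq')
    · rw [List.find?_cons_of_neg (by simpa using hP)] at hf
      intro q hq hPq
      rcases List.mem_cons.1 hq with rfl | hq'
      · exact absurd hPq (by simpa using hP)
      · exact ih ht hf q hq' hPq

theorem pairwise_pvS (a0 : String) (l : List (Int × String))
    (hpw : l.Pairwise (fun a b => a.1 < b.1)) : (pvS a0 l).Pairwise (· < ·) := by
  unfold pvS
  exact (List.pairwise_map).2 ((hpw.filter _))

theorem pairwise_pvPairs (S E : List Int) (hS : S.Pairwise (· < ·)) :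
    (pvPairs S E).Pairwise (fun a b => a.1 ≤ b.1) := by
  induction S with
  | nil => exact List.Pairwise.nil
  | cons s S ih =>
    rcases List.pairwise_cons.1 hS with ⟨hs, hS'⟩
    unfold pvPairs
    rw [List.flatMap_cons]
    apply List.pairwise_append.2
    refine ⟨?_, ih hS', ?_⟩
    · apply List.pairwise_map.2
      have triv : ∀ E' : List Int, List.Pairwise (fun (_ _ : Int) => True) E' := by
        intro E'
        induction E' with
        | nil => exact .nil
        | cons a t iht => exact .cons (fun _ _ => trivial) iht
      exact (triv E).imp (fun _ => le_refl s)
    · intro a ha b hb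
      obtain ⟨e, _, rfl⟩ := List.mem_map.1 ha
      have hb1 : b.1 ∈ S := ((mem_pvPairs S E b).1 hb).1
      exact le_of_lt (hs _ hb1)

-- B's one-pass candidates: for each end token, the pair with the most recent start index
def pvCands (a0 aN : String) : Int → List (Int × String) → List (Int × Int)
  | _, [] => []
  | sl, q :: t =>
    (if q.2 == aN ∧ 0 ≤ (if q.2 == a0 then q.1 else sl) then
      [((if q.2 == a0 then q.1 else sl), q.1 + 1)] else [])
      ++ pvCands a0 aN (if q.2 == a0 then q.1 else sl) t

theorem bfold_eq (a0 aN : String) (l : List (Int × String)) (sl : Int) (st : Int × Int × Int)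
    (hlt : ∀ q ∈ l, sl < q.1) (hpw : l.Pairwise (fun a b => a.1 < b.1)) :
    (l.foldl
      (fun (st : Int × Int × Int × Int) q =>
        let sl := if q.2 == a0 then q.1 else st.1
        if q.2 == aN ∧ sl ≥ 0 ∧ q.1 + 1 - sl < st.2.1 then
          (sl, q.1 + 1 - sl, sl, q.1 + 1)
        else (sl, st.2))
      (sl, st)).2
      = (pvCands a0 aN sl l).foldl pvUpd st := by
  induction l generalizing sl st with
  | nil => rfl
  | cons q t ih =>
    rcases List.pairwise_cons.1 hpw with ⟨hq, hpw'⟩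
    have hlt' : ∀ r ∈ t, (if q.2 == a0 then q.1 else sl) < r.1 := by
      intro r hr
      split_ifs
      · exact hq r hr
      · exact hlt r (List.mem_cons_of_mem _ hr)
    have hsl' : (if q.2 == a0 then q.1 else sl) ≤ q.1 := by
      split_ifs
      · exact le_refl _
      · exact le_of_lt (hlt q (List.mem_cons_self ..))
    rw [List.foldl_cons]
    show (List.foldl _ (let sl' := if q.2 == a0 then q.1 else sl;
      if q.2 == aN ∧ sl' ≥ 0 ∧ q.1 + 1 - sl' < st.1 then (sl', q.1 + 1 - sl', sl', q.1 + 1)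
      else (sl', st)) t).2 = _
    set sl' := if q.2 == a0 then q.1 else sl with hsl
    by_cases hc : (q.2 == aN) = true ∧ 0 ≤ sl'
    · have hcands : pvCands a0 aN sl (q :: t) = (sl', q.1 + 1) :: pvCands a0 aN sl' t := by
        show (if q.2 == aN ∧ 0 ≤ sl' then _ else _) ++ _ = _
        rw [if_pos hc]
        rfl
      rw [hcands, List.foldl_cons]
      have hupd : pvUpd st (sl', q.1 + 1) =
          if q.1 + 1 - sl' < st.1 then (q.1 + 1 - sl', sl', q.1 + 1) else st := by
        unfold pvUpd
        by_cases hlt2 : q.1 + 1 - sl' < st.1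
        · rw [if_pos hlt2, if_pos ⟨hlt2, by omega⟩]
        · rw [if_neg hlt2, if_neg (by omega)]
      by_cases hlt2 : q.1 + 1 - sl' < st.1
      · rw [if_pos ⟨hc.1, hc.2, hlt2⟩]
        rw [hupd, if_pos hlt2]
        exact ih sl' _ hlt' hpw'
      · rw [if_neg (by intro h; exact hlt2 h.2.2)]
        rw [hupd, if_neg hlt2]
        exact ih sl' _ hlt' hpw'
    · have hcands : pvCands a0 aN sl (q :: t) = pvCands a0 aN sl' t := by
        show (if q.2 == aN ∧ 0 ≤ sl' then _ else _) ++ _ = _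
        rw [if_neg hc]
        rfl
      rw [hcands]
      rw [if_neg (by intro h; exact hc ⟨h.1, h.2.1⟩)]
      exact ih sl' _ hlt' hpw'

theorem pvS_cons (a0 : String) (q : Int × String) (t : List (Int × String)) :
    pvS a0 (q :: t) = (if q.2 == a0 then [q.1] else []) ++ pvS a0 t := by
  unfold pvS
  rw [List.filter_cons]
  split_ifs <;> simp

theorem pvE_cons (aN : String) (q : Int × String) (t : List (Int × String)) :
    pvE aN (q :: t) = (if q.2 == aN then [q.1 + 1] else []) ++ pvE aN t := by
  unfold pvE
  rw [List.filter_cons]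
  split_ifs <;> simp

theorem pvCands_cons (a0 aN : String) (sl : Int) (q : Int × String) (t : List (Int × String)) :
    pvCands a0 aN sl (q :: t) =
      (if q.2 == aN ∧ 0 ≤ (if q.2 == a0 then q.1 else sl) then
        [((if q.2 == a0 then q.1 else sl), q.1 + 1)] else [])
        ++ pvCands a0 aN (if q.2 == a0 then q.1 else sl) t := rfl

theorem pvCands_sound (a0 aN : String) (l : List (Int × String)) (sl : Int)
    (hlt : ∀ q ∈ l, sl < q.1) (hpw : l.Pairwise (fun a b => a.1 < b.1)) :
    ∀ c ∈ pvCands a0 aN sl l,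
      c.2 ∈ pvE aN l ∧ (c.1 ∈ pvS a0 l ∨ (c.1 = sl ∧ 0 ≤ sl)) ∧ c.1 < c.2 := by
  induction l generalizing sl with
  | nil => intro c hc; simp [pvCands] at hc
  | cons q t ih =>
    rcases List.pairwise_cons.1 hpw with ⟨hq, hpw'⟩
    set sl' := if q.2 == a0 then q.1 else sl with hsl
    have hlt' : ∀ r ∈ t, sl' < r.1 := by
      intro r hr
      rw [hsl]
      split_ifs
      · exact hq r hr
      · exact hlt r (List.mem_cons_of_mem _ hr)
    have hsl'le : sl' ≤ q.1 := by
      rw [hsl]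
      split_ifs
      · exact le_refl _
      · exact le_of_lt (hlt q (List.mem_cons_self ..))
    intro c hc
    rw [pvCands_cons, ← hsl] at hc
    rcases List.mem_append.1 hc with hh | ht
    · have hcond : (q.2 == aN) = true ∧ 0 ≤ sl' := by
        by_contra hn
        rw [if_neg hn] at hh
        simp at hh
      rw [if_pos hcond] at hh
      obtain rfl : c = (sl', q.1 + 1) := by simpa using hh
      refine ⟨?_, ?_, by simp only; omega⟩
      · rw [pvE_cons, if_pos hcond.1]
        simp
      · by_cases h0 : (q.2 == a0) = true
        · left
          rw [pvS_cons, if_pos h0]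
          simp only [hsl, if_pos h0]
          simp
        · right
          constructor
          · simp only [hsl, if_neg h0]
          · have := hcond.2
            rw [hsl, if_neg h0] at this
            exact this
    · obtain ⟨h2, h1, hp⟩ := ih sl' hlt' hpw' c ht
      refine ⟨?_, ?_, hp⟩
      · rw [pvE_cons]
        exact List.mem_append_right _ h2
      · rcases h1 with h1 | ⟨he, hnn⟩
        · left
          rw [pvS_cons]
          exact List.mem_append_right _ h1
        · by_cases h0 : (q.2 == a0) = true
          · left
            rw [pvS_cons, if_pos h0]
            rw [hsl, if_pos h0] at he
            simp [he]
          · right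
            rw [hsl, if_neg h0] at he hnn
            exact ⟨he, hnn⟩

theorem pvCands_complete (a0 aN : String) (l : List (Int × String)) (sl : Int)
    (hlt : ∀ q ∈ l, sl < q.1) (hpw : l.Pairwise (fun a b => a.1 < b.1))
    (hnn : ∀ q ∈ l, 0 ≤ q.1) :
    ∀ s e, (s ∈ pvS a0 l ∨ (s = sl ∧ 0 ≤ sl)) → e ∈ pvE aN l → s < e →
      ∃ c ∈ pvCands a0 aN sl l, c.2 = e ∧ s ≤ c.1 := by
  induction l generalizing sl with
  | nil => intro s e hs he; simp [pvE] at he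
  | cons q t ih =>
    rcases List.pairwise_cons.1 hpw with ⟨hq, hpw'⟩
    set sl' := if q.2 == a0 then q.1 else sl with hsl
    have hlt' : ∀ r ∈ t, sl' < r.1 := by
      intro r hr
      rw [hsl]; split_ifs
      · exact hq r hr
      · exact hlt r (List.mem_cons_of_mem _ hr)
    have hnn' : ∀ r ∈ t, 0 ≤ r.1 := fun r hr => hnn r (List.mem_cons_of_mem _ hr)
    have hslq : sl < q.1 := hlt q (List.mem_cons_self ..)
    have hsl'ge : sl ≤ sl' := by
      rw [hsl]; split_ifs
      · omega
      · exact le_refl _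
    intro s e hs he hse
    rw [pvE_cons] at he
    rcases List.mem_append.1 he with hh | het
    · have hq2 : (q.2 == aN) = true := by
        by_contra hn
        rw [if_neg (by simpa using hn)] at hh
        simp at hh
      rw [if_pos hq2] at hh
      obtain rfl : e = q.1 + 1 := by simpa using hh
      have hsle : s ≤ sl' ∧ 0 ≤ sl' := by
        rcases hs with hsS | ⟨rfl, hnn0⟩
        · rw [pvS_cons] at hsS
          rcases List.mem_append.1 hsS with hsh | hst
          · have h0 : (q.2 == a0) = true := by
              by_contra hn
              rw [if_neg (by simpa using hn)] at hsh
              simp at hsh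
            rw [if_pos h0] at hsh
            obtain rfl : s = q.1 := by simpa using hsh
            rw [hsl, if_pos h0]
            exact ⟨le_refl _, hnn q (List.mem_cons_self ..)⟩
          · obtain ⟨r, hr, _, rfl⟩ := (mem_pvS a0 t _).1 hst
            have := hq r hr
            omega
        · exact ⟨hsl'ge, le_trans hnn0 hsl'ge⟩
      refine ⟨(sl', q.1 + 1), ?_, rfl, hsle.1⟩
      rw [pvCands_cons, ← hsl, if_pos ⟨hq2, hsle.2⟩]
      simp
    · obtain ⟨r, hr, hraN, hre⟩ := (mem_pvE aN t _).1 het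
      have hqr : q.1 < r.1 := hq r hr
      have step : ∃ s'', (s'' ∈ pvS a0 t ∨ (s'' = sl' ∧ 0 ≤ sl')) ∧ s ≤ s'' ∧ s'' < e := by
        rcases hs with hsS | ⟨rfl, hnn0⟩
        · rw [pvS_cons] at hsS
          rcases List.mem_append.1 hsS with hsh | hst
          · have h0 : (q.2 == a0) = true := by
              by_contra hn
              rw [if_neg (by simpa using hn)] at hsh
              simp at hsh
            rw [if_pos h0] at hsh
            obtain rfl : s = q.1 := by simpa using hsh
            refine ⟨q.1, Or.inr ⟨by rw [hsl, if_pos h0], ?_⟩, le_refl _, hse⟩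
            rw [hsl, if_pos h0]
            exact hnn q (List.mem_cons_self ..)
          · exact ⟨s, Or.inl hst, le_refl _, hse⟩
        · refine ⟨sl', Or.inr ⟨rfl, le_trans hnn0 hsl'ge⟩, hsl'ge, ?_⟩
          rw [hsl]
          split_ifs <;> omega
      obtain ⟨s'', hs'', hss, hs''e⟩ := step
      obtain ⟨c, hc, hce, hsc⟩ := ih sl' hlt' hpw' hnn' s'' e hs''
        ((mem_pvE aN t _).2 ⟨r, hr, hraN, hre⟩) hs''e
      refine ⟨c, ?_, hce, le_trans hss hsc⟩
      rw [pvCands_cons, ← hsl]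
      exact List.mem_append_right _ hc

theorem pvCands_sorted (a0 aN : String) (l : List (Int × String)) (sl : Int)
    (hlt : ∀ q ∈ l, sl < q.1) (hpw : l.Pairwise (fun a b => a.1 < b.1)) :
    (pvCands a0 aN sl l).Pairwise (fun a b => a.2 < b.2) := by
  induction l generalizing sl with
  | nil => exact .nil
  | cons q t ih =>
    rcases List.pairwise_cons.1 hpw with ⟨hq, hpw'⟩
    set sl' := if q.2 == a0 then q.1 else sl with hsl
    have hlt' : ∀ r ∈ t, sl' < r.1 := by
      intro r hr
      rw [hsl]; split_ifs
      · exact hq r hr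
      · exact hlt r (List.mem_cons_of_mem _ hr)
    rw [pvCands_cons, ← hsl]
    apply List.pairwise_append.2
    refine ⟨?_, ih sl' hlt' hpw', ?_⟩
    · split_ifs <;> simp
    · intro a ha b hb
      have ha2 : a.2 = q.1 + 1 := by
        by_cases hcnd : (q.2 == aN) = true ∧ 0 ≤ sl'
        · rw [if_pos hcnd] at ha
          obtain rfl : a = (sl', q.1 + 1) := by simpa using ha
          rfl
        · rw [if_neg hcnd] at ha
          simp at ha
      obtain ⟨hb2, _, _⟩ := pvCands_sound a0 aN t sl' hlt' hpw' b hb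
      obtain ⟨r, hr, _, hre⟩ := (mem_pvE aN t _).1 hb2
      have := hq r hr
      omega

theorem enum_nonneg (toks : List String) : ∀ q ∈ PySem.List.enumerate toks 0, 0 ≤ q.1 := by
  intro q hq
  obtain ⟨k, hk, rfl⟩ := (PySem.List.mem_enumerate_iff _ _ _).1 hq
  simp

theorem dmin_cands_eq (a0 aN : String) (l : List (Int × String))
    (hpw : l.Pairwise (fun a b => a.1 < b.1)) (hnn : ∀ q ∈ l, 0 ≤ q.1) (d0 : Int) :
    pvDmin (pvCands a0 aN (-1) l) d0 = pvDmin (pvPairs (pvS a0 l) (pvE aN l)) d0 := by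
  have hlt : ∀ q ∈ l, (-1 : Int) < q.1 := fun q hq => by have := hnn q hq; omega
  apply le_antisymm
  · rcases pvDmin_mem (pvPairs (pvS a0 l) (pvE aN l)) d0 with h | ⟨p, hp, hpos, _, heq⟩
    · rw [h]; exact pvDmin_le _ _
    · obtain ⟨hs, he⟩ := (mem_pvPairs _ _ _).1 hp
      obtain ⟨c, hc, hce, hsc⟩ := pvCands_complete a0 aN l (-1) hlt hpw hnn p.1 p.2
        (Or.inl hs) he (by omega)
      have hcpos := (pvCands_sound a0 aN l (-1) hlt hpw c hc).2.2
      rw [heq]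
      exact le_trans (pvDmin_le_mem _ d0 c hc (by omega)) (by omega)
  · rcases pvDmin_mem (pvCands a0 aN (-1) l) d0 with h | ⟨c, hc, hpos, _, heq⟩
    · rw [h]; exact pvDmin_le _ _
    · obtain ⟨h2, h1, _⟩ := pvCands_sound a0 aN l (-1) hlt hpw c hc
      have h1' : c.1 ∈ pvS a0 l := by
        rcases h1 with h1 | ⟨_, h⟩
        · exact h1
        · omega
      rw [heq]
      exact pvDmin_le_mem _ d0 c ((mem_pvPairs _ _ _).2 ⟨h1', h2⟩) hpos

theorem find_agree (a0 aN : String) (l : List (Int × String))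
    (hpw : l.Pairwise (fun a b => a.1 < b.1)) (hnn : ∀ q ∈ l, 0 ≤ q.1) (d0 : Int)
    (hd : pvDmin (pvPairs (pvS a0 l) (pvE aN l)) d0 < d0)
    (p p' : Int × Int)
    (hf : (pvPairs (pvS a0 l) (pvE aN l)).find?
      (fun q => q.2 - q.1 == pvDmin (pvPairs (pvS a0 l) (pvE aN l)) d0) = some p)
    (hf' : (pvCands a0 aN (-1) l).find?
      (fun q => q.2 - q.1 == pvDmin (pvCands a0 aN (-1) l) d0) = some p') :
    p = p' := by
  have hlt : ∀ q ∈ l, (-1 : Int) < q.1 := fun q hq => by have := hnn q hq; omega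
  set ps := pvPairs (pvS a0 l) (pvE aN l) with hps
  set cs := pvCands a0 aN (-1) l with hcs
  set d := pvDmin ps d0 with hdd
  have hdc : pvDmin cs d0 = d := dmin_cands_eq a0 aN l hpw hnn d0
  have hdpos : 0 < d := by
    rcases pvDmin_mem ps d0 with h | ⟨q, _, hq1, _, hq3⟩
    · omega
    · omega
  have hgp : p.2 - p.1 = d := by
    have := List.find?_some hf
    simpa using this
  have hgp' : p'.2 - p'.1 = d := by
    have := List.find?_some hf'
    rw [hdc] at this
    simpa using this
  have hpmem : p ∈ ps := List.mem_of_find?_eq_some hf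
  have hp'memc : p' ∈ cs := List.mem_of_find?_eq_some hf'
  obtain ⟨hp'2, hp'1, _⟩ := pvCands_sound a0 aN l (-1) hlt hpw p' hp'memc
  have hp'1' : p'.1 ∈ pvS a0 l := by
    rcases hp'1 with h | ⟨_, h⟩
    · exact h
    · omega
  have hp'mem : p' ∈ ps := (mem_pvPairs _ _ _).2 ⟨hp'1', hp'2⟩
  have hppw : ps.Pairwise (fun a b => a.1 ≤ b.1) :=
    pairwise_pvPairs _ _ (pairwise_pvS a0 l hpw)
  have h1 : p.1 ≤ p'.1 := by
    rcases find?_min_of_pairwise hppw hf p' hp'mem (by simpa using hgp') with h | h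
    · rw [h]
    · exact h
  -- p itself is a candidate
  obtain ⟨hs, he⟩ := (mem_pvPairs _ _ _).1 hpmem
  obtain ⟨c, hc, hce, hsc⟩ := pvCands_complete a0 aN l (-1) hlt hpw hnn p.1 p.2
    (Or.inl hs) he (by omega)
  have hcpos := (pvCands_sound a0 aN l (-1) hlt hpw c hc).2.2
  have hcd : c.2 - c.1 = d := by
    have hle : c.2 - c.1 ≤ d := by omega
    have hge : d ≤ c.2 - c.1 := by
      rw [← hdc]
      exact pvDmin_le_mem _ d0 c hc (by omega)
    omega
  have hcp : c = p := by
    have : c.1 = p.1 := by omega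
    exact Prod.ext this (by omega)
  have hcspw : cs.Pairwise (fun a b => a.2 < b.2) := pvCands_sorted a0 aN l (-1) hlt hpw
  have h2 : p'.2 ≤ p.2 := by
    rcases find?_min_of_pairwise hcspw hf' c hc (by
      rw [hdc]
      simpa using hcd) with h | h
    · rw [h, hcp]
    · rw [hcp] at h
      omega
  exact Prod.ext (by omega) (by omega)

theorem foldl_pairs_span (a0 aN : String) (toks : List String) :
    ((pvPairs (pvS a0 (PySem.List.enumerate toks 0)) (pvE aN (PySem.List.enumerate toks 0))).foldl
      pvUpd (100000000, 0, PySem.List.len toks)).2 = pvSpan toks a0 aN := by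
  set l := PySem.List.enumerate toks 0 with hl
  set ps := pvPairs (pvS a0 l) (pvE aN l) with hps
  set d := pvDmin ps 100000000 with hd
  by_cases hlt : d < 100000000
  · obtain ⟨p, hf, he⟩ := foldl_pvUpd_find ps (100000000, 0, PySem.List.len toks) (by exact hlt)
    rw [he]
    unfold pvSpan
    rw [← hl, ← hps, ← hd, if_pos hlt, hf]

  · have heq : d = 100000000 := le_antisymm (pvDmin_le _ _) (not_lt.1 hlt)
    rw [foldl_pvUpd_stable ps _ (by exact heq)]
    unfold pvSpan
    rw [← hl, ← hps, ← hd, if_neg hlt]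

theorem foldl_cands_span (a0 aN : String) (toks : List String) :
    ((pvCands a0 aN (-1) (PySem.List.enumerate toks 0)).foldl
      pvUpd (100000000, 0, PySem.List.len toks)).2 = pvSpan toks a0 aN := by
  set l := PySem.List.enumerate toks 0 with hl
  have hpw : l.Pairwise (fun a b => a.1 < b.1) := PySem.List.pairwise_lt_enumerate toks 0
  have hnn : ∀ q ∈ l, 0 ≤ q.1 := enum_nonneg toks
  set ps := pvPairs (pvS a0 l) (pvE aN l) with hps
  set cs := pvCands a0 aN (-1) l with hcs
  have hdc : pvDmin cs 100000000 = pvDmin ps 100000000 := dmin_cands_eq a0 aN l hpw hnn _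
  by_cases hlt : pvDmin ps 100000000 < 100000000
  · obtain ⟨p, hf, he⟩ := foldl_pvUpd_find ps (100000000, 0, PySem.List.len toks) (by exact hlt)
    obtain ⟨p', hf', he'⟩ := foldl_pvUpd_find cs (100000000, 0, PySem.List.len toks) (by rw [hdc]; exact hlt)
    have : p = p' := find_agree a0 aN l hpw hnn 100000000 hlt p p' hf hf'
    rw [he']
    unfold pvSpan
    rw [← hl, ← hps, if_pos hlt, hf, ← this]
  · have heq : pvDmin cs 100000000 = 100000000 := by rw [hdc]; exact le_antisymm (pvDmin_le _ _) (not_lt.1 hlt)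
    rw [foldl_pvUpd_stable cs _ (by exact heq)]
    unfold pvSpan
    rw [← hl, ← hps, if_neg hlt]

-- one simultaneous pass of s.replace('  ', ' ')
def pvRepAll : List Char → List Char
  | [] => []
  | c :: t =>
    if c = ' ' ∧ t.head? = some ' ' then ' ' :: pvRepAll t.tail
    else c :: pvRepAll t
termination_by l => l.length
decreasing_by all_goals (simp [List.length_tail]; try omega)

theorem pvRepAll_nil : pvRepAll [] = [] := by rw [pvRepAll]
theorem pvRepAll_dd (t : List Char) : pvRepAll (' ' :: ' ' :: t) = ' ' :: pvRepAll t := by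
  rw [pvRepAll]
  simp
theorem pvRepAll_cons (c : Char) (t : List Char) (h : ¬(c = ' ' ∧ t.head? = some ' ')) :
    pvRepAll (c :: t) = c :: pvRepAll t := by
  rw [pvRepAll]
  rw [if_neg h]

def pvHasDD : List Char → Bool
  | [] => false
  | c :: t => (c == ' ' && t.head? == some ' ') || pvHasDD t

def pvDed (b : Bool) : List Char → List Char
  | [] => []
  | c :: t => if c == ' ' && b then pvDed true t else c :: pvDed (c == ' ') t

theorem pvDedup_foldl (l : List Char) (acc : List Char) :
    l.foldl (fun acc c => if c == ' ' && acc.getLast? == some ' ' then acc else acc ++ [c]) acc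
      = acc ++ pvDed (acc.getLast? == some ' ') l := by
  induction l generalizing acc with
  | nil => simp [pvDed]
  | cons c t ih =>
    rw [List.foldl_cons]
    by_cases hc : (c == ' ' && acc.getLast? == some ' ') = true
    · rw [if_pos hc, ih]
      simp only [Bool.and_eq_true] at hc
      rw [hc.2]
      show _ = acc ++ pvDed true (c :: t)
      rw [show pvDed true (c :: t) = pvDed true t by
        show (if (c == ' ' && true) = true then _ else _) = _
        rw [if_pos (by simp [hc.1])]]
    · rw [if_neg hc, ih]
      rw [List.getLast?_concat]
      by_cases hlast : (acc.getLast? == some ' ') = true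
      · have hc' : (c == ' ') = false := by
          cases hcc : c == ' '
          · rfl
          · exact absurd (by simp [hcc, hlast]) hc
        rw [hlast]
        show _ = acc ++ pvDed true (c :: t)
        rw [show pvDed true (c :: t) = c :: pvDed (c == ' ') t by
          show (if (c == ' ' && true) = true then _ else _) = _
          rw [if_neg (by simp [hc'])]]
        have : (some c == some ' ') = (c == ' ') := by simp
        rw [this, hc', List.append_assoc]
        rfl
      · have hlast' : (acc.getLast? == some ' ') = false := by
          cases h : (acc.getLast? == some ' ')
          · rfl
          · exact absurd h hlast
        rw [hlast']
        show _ = acc ++ pvDed false (c :: t)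
        rw [show pvDed false (c :: t) = c :: pvDed (c == ' ') t by
          show (if (c == ' ' && false) = true then _ else _) = _
          rw [if_neg (by simp)]]
        have : (some c == some ' ') = (c == ' ') := by simp
        rw [this, List.append_assoc]
        rfl

theorem pvHasDD_iff_infix (l : List Char) : [' ', ' '] <:+: l ↔ pvHasDD l = true := by
  induction l with
  | nil => simp [pvHasDD]
  | cons c t ih =>
    rw [List.infix_cons_iff]
    show _ ↔ ((c == ' ' && t.head? == some ' ') || pvHasDD t) = true
    rw [Bool.or_eq_true, ← ih]
    constructor
    · rintro (hpre | hinf)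
      · left
        rcases t with _ | ⟨d, t'⟩
        · rcases hpre with ⟨u, hu⟩
          simp at hu
        · rw [List.cons_prefix_cons] at hpre
          obtain ⟨rfl, hpre'⟩ := hpre
          rw [List.cons_prefix_cons] at hpre'
          obtain ⟨rfl, _⟩ := hpre'
          simp
      · right; exact hinf
    · rintro (hb | hinf)
      · left
        rcases t with _ | ⟨d, t'⟩
        · simp at hb
        · simp only [Bool.and_eq_true, beq_iff_eq, List.head?_cons, Option.some.injEq] at hb
          obtain ⟨rfl, rfl⟩ := hb
          rw [List.cons_prefix_cons]
          exact ⟨rfl, List.cons_prefix_cons.2 ⟨rfl, List.nil_prefix⟩⟩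
      · right; exact hinf

theorem pvDed_noDD (l : List Char) (h : pvHasDD l = false) :
    pvDed false l = l ∧ (l.head? ≠ some ' ' → pvDed true l = l) := by
  induction l with
  | nil => exact ⟨rfl, fun _ => rfl⟩
  | cons c t ih =>
    have hsplit : ((c == ' ' && t.head? == some ' ') || pvHasDD t) = false := h
    rw [Bool.or_eq_false_iff] at hsplit
    obtain ⟨hcd, ht⟩ := hsplit
    obtain ⟨ih1, ih2⟩ := ih ht
    constructor
    · show (if (c == ' ' && false) = true then _ else _) = _
      rw [if_neg (by simp)]
      by_cases hc : (c == ' ') = true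
      · rw [hc]
        have hth : t.head? ≠ some ' ' := by
          intro hh
          rw [hc, hh] at hcd
          simp at hcd
        rw [ih2 hth]
      · have hc' : (c == ' ') = false := by
          cases h' : c == ' '
          · rfl
          · exact absurd h' hc
        rw [hc', ih1]
    · intro hch
      have hc' : (c == ' ') = false := by
        cases h' : c == ' '
        · rfl
        · exact absurd (by simpa using h' : c = ' ') (by simpa using hch)
      show (if (c == ' ' && true) = true then _ else _) = _
      rw [if_neg (by simp [hc'])]
      rw [hc', ih1]

theorem pvDed_repAll (l : List Char) : ∀ b, pvDed b (pvRepAll l) = pvDed b l := by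
  induction l using pvRepAll.induct with
  | case1 => intro b; rw [pvRepAll_nil]
  | case2 c t h ih =>
    obtain ⟨rfl, hh⟩ := h
    obtain ⟨t', rfl⟩ : ∃ t', t = ' ' :: t' := by
      rcases t with _ | ⟨d, t'⟩
      · simp at hh
      · simp at hh
        exact ⟨t', by rw [hh]⟩
    simp only [List.tail_cons] at ih
    intro b
    rw [pvRepAll_dd t']
    cases b
    · show (if (_ && false) = true then _ else _) = (if (_ && false) = true then _ else _)
      rw [if_neg (by simp), if_neg (by simp)]
      show _ :: pvDed (' ' == ' ') _ = _ :: pvDed (' ' == ' ') (' ' :: t')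
      rw [show (' ' == ' ') = true from rfl]
      show _ :: pvDed true _ = _ :: (if (' ' == ' ' && true) = true then _ else _)
      rw [if_pos (by simp)]
      rw [ih true]
    · show (if (' ' == ' ' && true) = true then _ else _) = (if (' ' == ' ' && true) = true then _ else _)
      rw [if_pos (by simp), if_pos (by simp)]
      show pvDed true _ = pvDed true (' ' :: t')
      rw [show pvDed true (' ' :: t') = pvDed true t' by
        show (if (' ' == ' ' && true) = true then _ else _) = _
        rw [if_pos (by simp)]]
      rw [ih true]
  | case3 c t h ih =>
    intro b
    rw [pvRepAll_cons c t h]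
    by_cases hcb : (c == ' ' && b) = true
    · show (if (c == ' ' && b) = true then _ else _) = (if (c == ' ' && b) = true then _ else _)
      rw [if_pos hcb, if_pos hcb]
      exact ih true
    · show (if (c == ' ' && b) = true then _ else _) = (if (c == ' ' && b) = true then _ else _)
      rw [if_neg hcb, if_neg hcb]
      rw [ih (c == ' ')]

theorem pvRepAll_length_le (l : List Char) : (pvRepAll l).length ≤ l.length := by
  induction l using pvRepAll.induct with
  | case1 => simp [pvRepAll]
  | case2 c t h ih =>
    rw [show pvRepAll (c :: t) = ' ' :: pvRepAll t.tail from by rw [pvRepAll]; rw [if_pos h]]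
    simp only [List.length_cons]
    have : t.tail.length ≤ t.length := by simp [List.length_tail]
    omega
  | case3 c t h ih =>
    rw [pvRepAll_cons c t h]
    simp only [List.length_cons]
    omega

theorem pvRepAll_length_lt (l : List Char) (h : pvHasDD l = true) :
    (pvRepAll l).length < l.length := by
  induction l using pvRepAll.induct with
  | case1 => simp [pvHasDD] at h
  | case2 c t hc ih =>
    rw [show pvRepAll (c :: t) = ' ' :: pvRepAll t.tail from by rw [pvRepAll]; rw [if_pos hc]]
    obtain ⟨t', rfl⟩ : ∃ t', t = ' ' :: t' := by
      rcases t with _ | ⟨d, t'⟩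
      · simp at hc
      · obtain ⟨_, hh⟩ := hc
        simp at hh
        exact ⟨t', by rw [hh]⟩
    simp only [List.tail_cons, List.length_cons]
    have := pvRepAll_length_le t'
    omega
  | case3 c t hc ih =>
    rw [pvRepAll_cons c t hc]
    have hdd : pvHasDD t = true := by
      have hsplit : ((c == ' ' && t.head? == some ' ') || pvHasDD t) = true := h
      rw [Bool.or_eq_true] at hsplit
      rcases hsplit with hb | hb
      · exfalso
        simp only [Bool.and_eq_true, beq_iff_eq] at hb
        exact hc ⟨hb.1, by simpa using hb.2⟩
      · exact hb
    simp only [List.length_cons]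
    have := ih hdd
    omega

-- Chars.replace with pattern '  ' is the one-pass pvRepAll
theorem replace_go_eq (fuel : Nat) (l acc : List Char) (h : l.length ≤ fuel) :
    PySem.Chars.replace.go [' ', ' '] [' '] fuel l acc = acc.reverse ++ pvRepAll l := by
  induction fuel generalizing l acc with
  | zero =>
    obtain rfl : l = [] := List.length_eq_zero_iff.1 (Nat.le_zero.1 h)
    rw [pvRepAll_nil]
    simp [PySem.Chars.replace.go]
  | succ fuel ih =>
    rcases l with _ | ⟨c, t⟩
    · rw [pvRepAll_nil]
      simp [PySem.Chars.replace.go]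
    · rcases t with _ | ⟨d, t'⟩
      · have hpre : ([' ', ' '].isPrefixOf [c]) = false := by
          simp [List.isPrefixOf]
        rw [show PySem.Chars.replace.go [' ', ' '] [' '] (fuel + 1) [c] acc
            = PySem.Chars.replace.go [' ', ' '] [' '] fuel [] (c :: acc) by
          simp [PySem.Chars.replace.go, hpre]]
        rw [ih [] (c :: acc) (by simp)]
        rw [pvRepAll_cons c [] (by simp), pvRepAll_nil]
        simp
      · by_cases hdc : c = ' ' ∧ d = ' '
        · obtain ⟨rfl, rfl⟩ := hdc
          have hpre : ([' ', ' '].isPrefixOf (' ' :: ' ' :: t')) = true := by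
            simp [List.isPrefixOf]
          rw [show PySem.Chars.replace.go [' ', ' '] [' '] (fuel + 1) (' ' :: ' ' :: t') acc
              = PySem.Chars.replace.go [' ', ' '] [' '] fuel t' (' ' :: acc) by
            simp [PySem.Chars.replace.go, hpre]]
          rw [ih t' (' ' :: acc) (by simp at h ⊢; omega)]
          rw [pvRepAll_dd t']
          simp
        · have hpre : ([' ', ' '].isPrefixOf (c :: d :: t')) = false := by
            simp [List.isPrefixOf]
            intro h1 h2
            exact hdc ⟨h1.symm, h2.symm⟩
          rw [show PySem.Chars.replace.go [' ', ' '] [' '] (fuel + 1) (c :: d :: t') acc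
              = PySem.Chars.replace.go [' ', ' '] [' '] fuel (d :: t') (c :: acc) by
            simp [PySem.Chars.replace.go, hpre]]
          rw [ih (d :: t') (c :: acc) (by simp at h ⊢; omega)]
          rw [pvRepAll_cons c (d :: t') (by simpa using hdc)]
          simp

theorem chars_replace_dd (l : List Char) :
    PySem.Chars.replace l [' ', ' '] [' '] = pvRepAll l := by
  rw [show PySem.Chars.replace l [' ', ' '] [' ']
      = PySem.Chars.replace.go [' ', ' '] [' '] l.length l [] by
    rw [PySem.Chars.replace]; rfl]
  rw [replace_go_eq l.length l [] (le_refl _)]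
  rfl

theorem chars_isIn_dd (l : List Char) : PySem.Chars.isIn [' ', ' '] l = pvHasDD l := by
  by_cases h : pvHasDD l = true
  · rw [h, (PySem.Chars.isIn_iff_infix _ _).2 ((pvHasDD_iff_infix l).2 h)]
  · have h' : pvHasDD l = false := by simpa using h
    rw [h', (PySem.Chars.isIn_eq_false_iff _ _).2 (fun hin => by
      rw [(pvHasDD_iff_infix l).1 hin] at h'; simp at h')]

theorem pvDedup_eq (cs : List Char) : pvDedup cs = pvDed false cs := by
  unfold pvDedup
  rw [pvDedup_foldl cs []]
  rfl

theorem pvCollapse_eq (fuel : Nat) (s : String) (h : s.toList.length ≤ fuel) :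
    pvCollapse fuel s = String.ofList (pvDed false s.toList) := by
  induction fuel generalizing s with
  | zero =>
    have hnil : s.toList = [] := List.length_eq_zero_iff.1 (Nat.le_zero.1 h)
    show s = _
    conv_lhs => rw [← String.ofList_toList (s := s)]
    rw [hnil]
    rfl
  | succ fuel ih =>
    show (if PySem.Str.isIn "  " s then pvCollapse fuel (PySem.Str.replace s "  " " ") else s) = _
    have hisin : PySem.Str.isIn "  " s = pvHasDD s.toList := by
      rw [PySem.Str.isIn_eq]
      exact chars_isIn_dd s.toList
    by_cases hdd : pvHasDD s.toList = true
    · rw [hisin, hdd, if_pos rfl]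
      have hrep : (PySem.Str.replace s "  " " ").toList = pvRepAll s.toList := by
        rw [PySem.Str.toList_replace]
        exact chars_replace_dd s.toList
      have hlen : (PySem.Str.replace s "  " " ").toList.length ≤ fuel := by
        rw [hrep]
        have := pvRepAll_length_lt s.toList hdd
        omega
      rw [ih _ hlen, hrep, pvDed_repAll s.toList false]
    · have hdd' : pvHasDD s.toList = false := by simpa using hdd
      rw [hisin, hdd', if_neg (by simp)]
      rw [show pvDed false s.toList = s.toList from (pvDed_noDD s.toList hdd').1,
        String.ofList_toList]

set_option maxHeartbeats 1600000 in
theorem final_assembly (auto : List String) (ltl : String) (prop_id : String)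
    (hne : auto ≠ [])
    (hc1 : PySem.Str.count (pvSub auto ltl) "(" ≥ PySem.Str.count (pvSub auto ltl) ")")
    (hc2 : (PySem.Str.count (pvSub auto ltl) "(" : Int) - (PySem.Str.count (pvSub auto ltl) ")" : Int) ≤ 1) :
    get_new_ltl auto ltl prop_id = get_new_ltl_alt auto ltl prop_id := by
  obtain ⟨a0, ha0⟩ : ∃ a0, PySem.List.pyGet? auto 0 = some a0 := by
    rcases auto with _ | ⟨x, rest⟩
    · exact absurd rfl hne
    · exact ⟨x, PySem.List.pyGet?_zero_cons ..⟩
  obtain ⟨aN, haN⟩ : ∃ aN, PySem.List.pyGet? auto (-1) = some aN := by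
    rw [PySem.List.pyGet?_neg_one]
    exact Option.isSome_iff_exists.1 (List.getLast?_isSome.2 hne)
  set toks := (PySem.Str.split? ltl " ").getD [] with htoks
  set l := PySem.List.enumerate toks 0 with hl
  -- reduce A's side
  have hA1 : l.foldl
      (fun (p : List Int × List Int) q =>
        let p1 := if q.2 == a0 then (p.1 ++ [q.1], p.2) else p
        if q.2 == aN then (p1.1, p1.2 ++ [q.1 + 1]) else p1)
      ([], []) = (pvS a0 l, pvE aN l) := by
    rw [enum_foldl_eq a0 aN l [] []]
    simp
  have hA2 : (pvS a0 l).foldl (fun st s =>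
        (pvE aN l).foldl (fun (st : Int × Int × Int) e =>
          if e - s < st.1 ∧ e - s > 0 then (e - s, s, e) else st) st)
      ((100000000 : Int), 0, PySem.List.len toks)
      = (pvPairs (pvS a0 l) (pvE aN l)).foldl pvUpd ((100000000 : Int), 0, PySem.List.len toks) := by
    rw [nested_foldl_eq]
  have hAspan : ((pvPairs (pvS a0 l) (pvE aN l)).foldl pvUpd
      ((100000000 : Int), 0, PySem.List.len toks)).2 = pvSpan toks a0 aN := by
    rw [hl]
    exact foldl_pairs_span a0 aN toks
  -- reduce B's side
  have hpw : l.Pairwise (fun a b => a.1 < b.1) := by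
    rw [hl]; exact PySem.List.pairwise_lt_enumerate toks 0
  have hlt : ∀ q ∈ l, (-1 : Int) < q.1 := by
    intro q hq
    rw [hl] at hq
    have := enum_nonneg toks q hq
    omega
  have hB1 : (l.foldl
      (fun (st : Int × Int × Int × Int) q =>
        let sl := if q.2 == a0 then q.1 else st.1
        if q.2 == aN ∧ sl ≥ 0 ∧ q.1 + 1 - sl < st.2.1 then
          (sl, q.1 + 1 - sl, sl, q.1 + 1)
        else (sl, st.2))
      ((-1 : Int), (100000000 : Int), 0, PySem.List.len toks)).2
      = (pvCands a0 aN (-1) l).foldl pvUpd ((100000000 : Int), 0, PySem.List.len toks) :=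
    bfold_eq a0 aN l (-1) ((100000000 : Int), 0, PySem.List.len toks) hlt hpw
  have hBspan : ((pvCands a0 aN (-1) l).foldl pvUpd
      ((100000000 : Int), 0, PySem.List.len toks)).2 = pvSpan toks a0 aN := by
    rw [hl]
    exact foldl_cands_span a0 aN toks
  -- the common selected substring
  have hsub : pvSub auto ltl
      = PySem.Str.join " " (PySem.List.slice toks (some (pvSpan toks a0 aN).1)
          (some (pvSpan toks a0 aN).2)) := by
    unfold pvSub
    rw [ha0, haN]
    rfl
  unfold get_new_ltl get_new_ltl_alt
  rw [ha0, haN]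
  simp only [← htoks, ← hl, hA1, hB1, hBspan]
  rw [hA2]
  simp only [hAspan]
  rw [← hsub]
  have hC : PySem.Str.count (pvSub auto ltl) "(" ≥ PySem.Str.count (pvSub auto ltl) ")" ∧
      (PySem.Str.count (pvSub auto ltl) "(" : Int) - (PySem.Str.count (pvSub auto ltl) ")" : Int) ≤ 1 :=
    ⟨hc1, hc2⟩
  rw [if_pos hC, if_pos hC]
  have hfin : ∀ (r : String),
      pvCollapse ((PySem.Str.len r).toNat + 1) r = String.ofList (pvDedup r.toList) := by
    intro r
    rw [pvDedup_eq]
    refine pvCollapse_eq _ _ ?_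
    rw [PySem.Str.len_eq, Int.toNat_natCast]
    omega
  rw [hfin]

-- ===== VERDICT (by name: the statement is the Claim_ definition above) =====
theorem get_new_ltl_spec : Claim_equal_get_new_ltl := by
  intro auto ltl prop_id _ hpre
  obtain ⟨hne, hc1, hc2⟩ := hpre
  exact final_assembly auto ltl prop_id hne hc1 hc2
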